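-- pv_equiv track=rewrite | github.com/iamaleko/leetcode | 3373-maximize-the-number-of-target-nodes-after-connecting-trees-ii/3373-maximize-the-number-of-target-nodes-after-connecting-trees-ii.py | markTree
-- ===== SOURCE A (Python) =====
-- from typing import Dict, Set
--
-- def markTree(tree: Dict[int, Set[int]], n: int, k: int) -> Dict[int, int]:
--   a, b, v = set(), set(), set()
--   def dfs(node: int, e: int) -> int:
--     (b if e & 1 else a).add(node)
--     v.add(node)
--     e += 1
--     for sub in tree[node]:
--       if sub not in v:
--         dfs(sub, e)
--   dfs(0, k)
--   an, bn = len(a), len(b)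
--   return {node: an if node in a else bn for node in range(n)}
-- ===== SOURCE B (Python) =====
-- def markTree(tree, n, k):
--     par = {}
--     stack = [(0, k % 2)]
--     while stack:
--         node, p = stack.pop()
--         if node in par:
--             continue
--         par[node] = p
--         stack.extend((sub, 1 - p) for sub in reversed(list(tree[node])))
--     an = sum(1 for p in par.values() if p == 0)
--     bn = len(par) - an
--     return {node: an if par.get(node) == 0 else bn for node in range(n)}
-- ===== Notes on version B (the rewrite author's own statement) =====
-- stated objective: alternative
-- what changed: A's recursive DFS over three sets (even set, odd set, visited) is replaced by an iterative explicit-stack traversal that maintains a single node->parity dict; the class sizes are then obtained by counting the dict's 0-values and the answer dict is built from dict lookups instead of set membership.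
import Mathlib
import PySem

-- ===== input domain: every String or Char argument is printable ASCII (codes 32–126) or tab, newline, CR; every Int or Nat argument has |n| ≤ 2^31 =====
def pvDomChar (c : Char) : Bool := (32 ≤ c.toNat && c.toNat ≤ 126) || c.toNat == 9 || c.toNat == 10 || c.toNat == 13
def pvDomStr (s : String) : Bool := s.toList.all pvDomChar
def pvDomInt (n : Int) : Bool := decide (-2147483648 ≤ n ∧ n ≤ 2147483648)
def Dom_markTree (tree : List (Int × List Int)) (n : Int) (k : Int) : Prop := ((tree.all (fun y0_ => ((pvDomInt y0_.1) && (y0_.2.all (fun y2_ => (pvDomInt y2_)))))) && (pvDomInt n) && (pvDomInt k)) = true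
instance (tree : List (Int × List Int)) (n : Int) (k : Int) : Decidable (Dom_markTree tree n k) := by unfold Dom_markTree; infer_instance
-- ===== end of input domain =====

-- B replaces A's recursive DFS over three sets by an iterative explicit-stack traversal
-- maintaining one node→parity dict, counting the dict's 0-values at the end (alternative
-- decomposition, same cost); equal return values are proved on Pre_ (no KeyError inputs).

-- shared dict-lookup helper: first-match lookup tree[x] (default [] — Pre_ excludes KeyError)
def getNbrs (tree : List (Int × List Int)) (x : Int) : List Int :=
  ((tree.find? (fun p => p.1 == x)).map (fun p => p.2)).getD []

-- ===== PORT A =====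
-- the traversal state of A: Python's sets a, b, v
structure DfsSt where
  a : List Int
  b : List Int
  v : List Int
deriving Repr, DecidableEq

-- fuel: strictly more than the number of distinct nodes ever visited (totality device only)
def fuelA (tree : List (Int × List Int)) : Nat := 1 + (0 :: tree.flatMap (fun p => p.2)).length

-- A's recursive dfs: mark node in b (odd e) or a (even e), mark visited, recurse on unvisited subs
def dfsA (tree : List (Int × List Int)) : Nat → Int → Int → DfsSt → DfsSt
  | 0, _, _, st => st
  | fuel+1, node, e, st =>
    let st1 : DfsSt := if e % 2 == 1 then ⟨st.a, PySem.Set.add st.b node, st.v⟩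
                       else ⟨PySem.Set.add st.a node, st.b, st.v⟩
    let st2 : DfsSt := ⟨st1.a, st1.b, PySem.Set.add st1.v node⟩
    (getNbrs tree node).foldl
      (fun s sub => if PySem.Set.contains s.v sub then s else dfsA tree fuel sub (e+1) s) st2

def markTree (tree : List (Int × List Int)) (n : Int) (k : Int) : List (Int × Int) :=
  let st := dfsA tree (fuelA tree) 0 k ⟨[], [], []⟩
  let an : Int := st.a.length
  let bn : Int := st.b.length
  (PySem.List.pyRange 0 n 1).map (fun node => (node, if PySem.Set.contains st.a node then an else bn))

-- ===== PORT B =====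
-- fuel: bounds the number of loop iterations (totality device only)
def fuelB (tree : List (Int × List Int)) : Nat :=
  1 + ((PySem.List.dedup (0 :: tree.flatMap (fun p => p.2))).map
        (fun x => 1 + (getNbrs tree x).length)).sum

-- B's while loop over a stack of (node, parity) pairs, building the node→parity dict par;
-- Lean list head = top of the Python stack (Python pushes reversed(list(tree[node])) and pops
-- from the end, so the first neighbour is on top = head here)
def loopB (tree : List (Int × List Int)) :
    Nat → List (Int × Int) → PySem.Dict Int Int → PySem.Dict Int Int
  | _, [], par => par
  | 0, _, par => par
  | fuel+1, (node, p) :: rest, par =>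
    if par.contains node then loopB tree fuel rest par
    else loopB tree fuel ((getNbrs tree node).map (fun sub => (sub, 1 - p)) ++ rest)
      (par.insert node p)

def markTree_alt (tree : List (Int × List Int)) (n : Int) (k : Int) : List (Int × Int) :=
  let par := loopB tree (fuelB tree) [(0, k % 2)] PySem.Dict.empty
  let an : Int := (par.values.filter (fun p => p == 0)).length
  let bn : Int := (par.size : Int) - an
  (PySem.List.pyRange 0 n 1).map
    (fun node => (node, if par.get? node == some 0 then an else bn))

-- ===== PRECONDITION & SPEC =====
-- iterated-neighbour closure of {0}: after (C tree).length rounds it is the set of nodes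
-- reachable from 0 in the dict's graph
def reachClose (tree : List (Int × List Int)) : Nat → List Int → List Int
  | 0, s => s
  | j+1, s => reachClose tree j (PySem.Set.update s (s.flatMap (fun x => getNbrs tree x)))

-- Pre_ excludes exactly the inputs where Python A raises KeyError: some node reachable from 0
-- has no entry in the dict (both Pythons raise there; the ports use a [] default instead)
def Pre_markTree (tree : List (Int × List Int)) (n : Int) (k : Int) : Prop :=
  ∀ x ∈ reachClose tree (0 :: tree.flatMap (fun p => p.2)).length [0], x ∈ tree.map (fun p => p.1)
instance (tree : List (Int × List Int)) (n : Int) (k : Int) : Decidable (Pre_markTree tree n k) := by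
  unfold Pre_markTree; infer_instance

def pvWitness_markTree : (List (Int × List Int)) × Int × Int := ([(0, [1, 2]), (1, [0]), (2, [0, 1])], 3, 0)

def Spec_markTree (tree : List (Int × List Int)) (n : Int) (k : Int) (out : List (Int × Int)) : Prop := out = markTree_alt tree n k
instance (tree : List (Int × List Int)) (n : Int) (k : Int) (out : List (Int × Int)) : Decidable (Spec_markTree tree n k out) := by unfold Spec_markTree; infer_instance

-- ===== CLAIM (what is proved, stated in full; the proofs are below) =====
def Claim_equal_markTree : Prop := ∀ (tree : List (Int × List Int)) (n : Int) (k : Int), Dom_markTree tree n k → Pre_markTree tree n k → Spec_markTree tree n k (markTree tree n k)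

-- ===== LEMMAS AND PROOFS =====

-- proof-only helpers -------------------------------------------------------

-- a set-state worklist loop, intermediate between A's recursion and B's dict loop
def loopS (tree : List (Int × List Int)) : Nat → List (Int × Int) → DfsSt → DfsSt
  | _, [], st => st
  | 0, _, st => st
  | fuel+1, (node, e) :: rest, st =>
    if PySem.Set.contains st.v node then loopS tree fuel rest st
    else
      let st1 : DfsSt := ⟨st.a, st.b, PySem.Set.add st.v node⟩
      let st2 : DfsSt := if e % 2 == 1 then ⟨st1.a, PySem.Set.add st1.b node, st1.v⟩
                         else ⟨PySem.Set.add st1.a node, st1.b, st1.v⟩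
      loopS tree fuel ((getNbrs tree node).map (fun sub => (sub, e+1)) ++ rest) st2

-- all nodes the traversal can ever visit
def Cl (tree : List (Int × List Int)) : List Int := 0 :: tree.flatMap (fun p => p.2)

-- number of candidate nodes not yet visited
def mU (tree : List (Int × List Int)) (st : DfsSt) : Nat :=
  ((Cl tree).toFinset \ st.v.toFinset).card

def degF (tree : List (Int × List Int)) (x : Int) : Nat := 1 + (getNbrs tree x).length

-- potential bounding the remaining loop iterations of loopS/loopB
def phi (tree : List (Int × List Int)) (stack : List (Int × Int)) (st : DfsSt) : Nat :=
  stack.length + ∑ x ∈ ((Cl tree).toFinset \ st.v.toFinset), degF tree x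

-- the common "visit a node" state update
def visit (node e : Int) (st : DfsSt) : DfsSt :=
  ⟨if e % 2 == 1 then st.a else PySem.Set.add st.a node,
   if e % 2 == 1 then PySem.Set.add st.b node else st.b,
   PySem.Set.add st.v node⟩

def bodyA (tree : List (Int × List Int)) (f : Nat) (s : DfsSt) (p : Int × Int) : DfsSt :=
  if PySem.Set.contains s.v p.1 then s else dfsA tree f p.1 p.2 s

-- A's dfs acting on a worklist
def procA (tree : List (Int × List Int)) (f : Nat) (stack : List (Int × Int)) (st : DfsSt) : DfsSt :=
  stack.foldl (bodyA tree f) st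

theorem dfsA_succ_eq (tree : List (Int × List Int)) (f : Nat) (node e : Int) (st : DfsSt) :
    dfsA tree (f+1) node e st
      = procA tree f ((getNbrs tree node).map (fun sub => (sub, e+1))) (visit node e st) := by
  by_cases h : (e % 2 == 1 : Bool) = true <;>
    simp [dfsA, procA, bodyA, visit, List.foldl_map, h]

theorem bodyA_of_mem (tree : List (Int × List Int)) (f : Nat) (s : DfsSt) (p : Int × Int)
    (h : p.1 ∈ s.v) : bodyA tree f s p = s := by
  unfold bodyA; simp [h]

theorem bodyA_of_not_mem (tree : List (Int × List Int)) (f : Nat) (s : DfsSt) (p : Int × Int)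
    (h : p.1 ∉ s.v) : bodyA tree f s p = dfsA tree f p.1 p.2 s := by
  unfold bodyA; simp [h]

theorem procA_cons (tree : List (Int × List Int)) (f : Nat) (q : Int × Int)
    (qs : List (Int × Int)) (st : DfsSt) :
    procA tree f (q :: qs) st = procA tree f qs (bodyA tree f st q) := rfl

theorem procA_append (tree : List (Int × List Int)) (f : Nat) (l₁ l₂ : List (Int × Int)) (st : DfsSt) :
    procA tree f (l₁ ++ l₂) st = procA tree f l₂ (procA tree f l₁ st) := by
  unfold procA; rw [List.foldl_append]

theorem loopS_succ_not_mem (tree : List (Int × List Int)) (f : Nat) (node e : Int)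
    (rest : List (Int × Int)) (st : DfsSt) (hv : node ∉ st.v) :
    loopS tree (f+1) ((node, e) :: rest) st
      = loopS tree f ((getNbrs tree node).map (fun sub => (sub, e+1)) ++ rest) (visit node e st) := by
  by_cases h : (e % 2 == 1 : Bool) = true <;>
    simp [loopS, visit, hv, h]

theorem nbr_mem_Cl (tree : List (Int × List Int)) (node sub : Int)
    (h : sub ∈ getNbrs tree node) : sub ∈ Cl tree := by
  unfold getNbrs at h
  cases hf : tree.find? (fun p => p.1 == node) with
  | none => rw [hf] at h; simp at h
  | some pr =>
      rw [hf] at h; simp at h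
      exact List.mem_cons_of_mem _ (List.mem_flatMap.2 ⟨pr, List.mem_of_find?_eq_some hf, h⟩)

theorem v_sub_foldl {β : Type} (body : DfsSt → β → DfsSt)
    (h : ∀ s b, s.v ⊆ (body s b).v) :
    ∀ (l : List β) (st : DfsSt), st.v ⊆ (l.foldl body st).v := by
  intro l
  induction l with
  | nil => intro st; simp
  | cons x xs ih => intro st; exact fun a ha => ih (body st x) (h st x ha)

theorem v_sub_visit (node e : Int) (st : DfsSt) : st.v ⊆ (visit node e st).v := by
  intro a ha; simp [visit, PySem.Set.mem_add]; exact Or.inl ha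

theorem v_sub_dfsA (tree : List (Int × List Int)) :
    ∀ (f : Nat) (node e : Int) (st : DfsSt), st.v ⊆ (dfsA tree f node e st).v := by
  intro f
  induction f with
  | zero => intro node e st; simp [dfsA]
  | succ f ih =>
      intro node e st
      rw [dfsA_succ_eq]
      refine Set.Subset.trans (v_sub_visit node e st) ?_
      exact v_sub_foldl _ (fun s b => by
        unfold bodyA; split
        · exact fun a ha => ha
        · exact ih b.1 b.2 s) _ _

theorem v_sub_procA (tree : List (Int × List Int)) (f : Nat) (stack : List (Int × Int)) (st : DfsSt) :
    st.v ⊆ (procA tree f stack st).v :=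
  v_sub_foldl _ (fun s b => by
    unfold bodyA; split
    · exact fun a ha => ha
    · exact v_sub_dfsA tree f b.1 b.2 s) stack st

theorem toFinset_sub {l l' : List Int} (h : l ⊆ l') : l.toFinset ⊆ l'.toFinset := by
  intro x hx; rw [List.mem_toFinset] at *; exact h hx

theorem mU_le_of_vsub (tree : List (Int × List Int)) {st st' : DfsSt} (h : st.v ⊆ st'.v) :
    mU tree st' ≤ mU tree st :=
  Finset.card_le_card (Finset.sdiff_subset_sdiff (Finset.Subset.refl _) (toFinset_sub h))

theorem mU_bodyA_le (tree : List (Int × List Int)) (f : Nat) (s : DfsSt) (p : Int × Int) :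
    mU tree (bodyA tree f s p) ≤ mU tree s := by
  unfold bodyA; split
  · exact le_refl _
  · exact mU_le_of_vsub tree (v_sub_dfsA tree f p.1 p.2 s)

theorem mU_procA_le (tree : List (Int × List Int)) (f : Nat) (stack : List (Int × Int)) (st : DfsSt) :
    mU tree (procA tree f stack st) ≤ mU tree st :=
  mU_le_of_vsub tree (v_sub_procA tree f stack st)

theorem toFinset_v_visit (node e : Int) (st : DfsSt) :
    (visit node e st).v.toFinset = insert node st.v.toFinset := by
  show (PySem.Set.add st.v node).toFinset = _
  rw [PySem.Set.add_eq_ite]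
  split
  · rename_i h
    rw [Finset.insert_eq_self.2 (List.mem_toFinset.2 h)]
  · ext x
    simp [List.toFinset_append]

theorem sdiff_insert_fin (s t : Finset Int) (a : Int) : s \ insert a t = (s \ t).erase a := by
  ext x; simp [Finset.mem_sdiff, Finset.mem_insert, Finset.mem_erase]; tauto

theorem mU_pos (tree : List (Int × List Int)) {node : Int} {st : DfsSt}
    (hC : node ∈ Cl tree) (hv : node ∉ st.v) : 1 ≤ mU tree st := by
  have : node ∈ (Cl tree).toFinset \ st.v.toFinset := by
    simp [Finset.mem_sdiff, List.mem_toFinset]; exact ⟨hC, hv⟩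
  exact Finset.card_pos.2 ⟨node, this⟩

theorem mU_visit_lt (tree : List (Int × List Int)) {node : Int} (e : Int) {st : DfsSt}
    (hC : node ∈ Cl tree) (hv : node ∉ st.v) :
    mU tree (visit node e st) < mU tree st := by
  unfold mU
  rw [toFinset_v_visit, sdiff_insert_fin]
  apply Finset.card_erase_lt_of_mem
  simp [Finset.mem_sdiff, List.mem_toFinset]; exact ⟨hC, hv⟩

theorem phi_visit_le (tree : List (Int × List Int)) {node : Int} (e : Int)
    (rest : List (Int × Int)) {st : DfsSt} (hC : node ∈ Cl tree) (hv : node ∉ st.v) :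
    phi tree ((getNbrs tree node).map (fun sub => (sub, e+1)) ++ rest) (visit node e st) + 2
      ≤ phi tree ((node, e) :: rest) st := by
  unfold phi
  rw [toFinset_v_visit, sdiff_insert_fin]
  have hmem : node ∈ (Cl tree).toFinset \ st.v.toFinset := by
    simp [Finset.mem_sdiff, List.mem_toFinset]; exact ⟨hC, hv⟩
  have hsum := Finset.sum_erase_add ((Cl tree).toFinset \ st.v.toFinset) (degF tree) hmem
  have hdeg : degF tree node = 1 + (getNbrs tree node).length := rfl
  simp only [List.length_append, List.length_map, List.length_cons]
  omega

theorem dfsA_succ_stable (tree : List (Int × List Int)) :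
    ∀ (f : Nat) (node e : Int) (st : DfsSt), node ∈ Cl tree → node ∉ st.v → mU tree st ≤ f →
      dfsA tree (f+1) node e st = dfsA tree f node e st := by
  intro f
  induction f using Nat.strong_induction_on with
  | _ f IH =>
  intro node e st hC hv hm
  have hpos := mU_pos tree hC hv
  obtain ⟨f', rfl⟩ : ∃ f', f = f' + 1 := ⟨f - 1, by omega⟩
  rw [dfsA_succ_eq, dfsA_succ_eq]
  have hm' : mU tree (visit node e st) ≤ f' := by
    have := mU_visit_lt tree e hC hv; omega
  have hall : ∀ p ∈ (getNbrs tree node).map (fun sub => (sub, e+1)), p.1 ∈ Cl tree := by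
    intro p hp
    obtain ⟨sub, hsub, rfl⟩ := List.mem_map.1 hp
    exact nbr_mem_Cl tree node sub hsub
  have main : ∀ (stack : List (Int × Int)) (st₁ : DfsSt),
      (∀ p ∈ stack, p.1 ∈ Cl tree) → mU tree st₁ ≤ f' →
      procA tree (f'+1) stack st₁ = procA tree f' stack st₁ := by
    intro stack
    induction stack with
    | nil => intro st₁ _ _; rfl
    | cons q qs ihq =>
        intro st₁ hall₁ hm₁
        have hbody : bodyA tree (f'+1) st₁ q = bodyA tree f' st₁ q := by
          unfold bodyA
          split
          · rfl
          · rename_i hq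
            exact IH f' (by omega) q.1 q.2 st₁ (hall₁ q (List.mem_cons_self))
              (fun hmem => hq ((PySem.Set.contains_iff _ _).2 hmem)) hm₁
        show List.foldl _ (bodyA tree (f'+1) st₁ q) qs = List.foldl _ (bodyA tree f' st₁ q) qs
        rw [hbody]
        exact ihq (bodyA tree f' st₁ q) (fun p hp => hall₁ p (List.mem_cons_of_mem _ hp))
          (le_trans (mU_bodyA_le tree f' st₁ q) hm₁)
  exact main _ (visit node e st) hall hm'

theorem dfsA_fuel_add (tree : List (Int × List Int)) (d : Nat) :
    ∀ (f : Nat) (node e : Int) (st : DfsSt), node ∈ Cl tree → node ∉ st.v → mU tree st ≤ f →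
      dfsA tree (f + d) node e st = dfsA tree f node e st := by
  induction d with
  | zero => intro f node e st _ _ _; rfl
  | succ d ih =>
      intro f node e st hC hv hm
      have : f + (d + 1) = (f + d) + 1 := by omega
      rw [this, dfsA_succ_stable tree (f + d) node e st hC hv (by omega), ih f node e st hC hv hm]

theorem dfsA_fuel_congr (tree : List (Int × List Int)) {f₁ f₂ : Nat} (node e : Int) (st : DfsSt)
    (hC : node ∈ Cl tree) (hv : node ∉ st.v) (h1 : mU tree st ≤ f₁) (h2 : mU tree st ≤ f₂) :
    dfsA tree f₁ node e st = dfsA tree f₂ node e st := by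
  have e1 : f₁ = mU tree st + (f₁ - mU tree st) := by omega
  have e2 : f₂ = mU tree st + (f₂ - mU tree st) := by omega
  rw [e1, e2, dfsA_fuel_add tree _ _ node e st hC hv (le_refl _),
    dfsA_fuel_add tree _ _ node e st hC hv (le_refl _)]

theorem procA_fuel_congr (tree : List (Int × List Int)) {f₁ f₂ : Nat} :
    ∀ (stack : List (Int × Int)) (st : DfsSt), (∀ p ∈ stack, p.1 ∈ Cl tree) →
      mU tree st ≤ f₁ → mU tree st ≤ f₂ →
      procA tree f₁ stack st = procA tree f₂ stack st := by
  intro stack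
  induction stack with
  | nil => intro st _ _ _; rfl
  | cons q qs ihq =>
      intro st hall h1 h2
      have hbody : bodyA tree f₁ st q = bodyA tree f₂ st q := by
        unfold bodyA
        split
        · rfl
        · rename_i hq
          exact dfsA_fuel_congr tree q.1 q.2 st (hall q (List.mem_cons_self))
            (fun hmem => hq ((PySem.Set.contains_iff _ _).2 hmem)) h1 h2
      show List.foldl _ (bodyA tree f₁ st q) qs = List.foldl _ (bodyA tree f₂ st q) qs
      rw [hbody]
      exact ihq (bodyA tree f₂ st q) (fun p hp => hall p (List.mem_cons_of_mem _ hp))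
        (le_trans (mU_bodyA_le tree f₂ st q) h1) (le_trans (mU_bodyA_le tree f₂ st q) h2)

theorem loopS_eq_procA (tree : List (Int × List Int)) :
    ∀ (fB : Nat) (stack : List (Int × Int)) (st : DfsSt) (fA : Nat),
      (∀ p ∈ stack, p.1 ∈ Cl tree) → phi tree stack st ≤ fB → mU tree st ≤ fA →
      loopS tree fB stack st = procA tree fA stack st := by
  intro fB
  induction fB using Nat.strong_induction_on with
  | _ fB IH =>
  intro stack st fA hall hphi hm
  match stack with
  | [] => cases fB <;> rfl
  | (node, e) :: rest =>
    have hphi1 : 1 ≤ phi tree ((node, e) :: rest) st := by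
      unfold phi; simp [List.length_cons]; omega
    obtain ⟨fB', rfl⟩ : ∃ fB', fB = fB' + 1 := ⟨fB - 1, by omega⟩
    by_cases hv : node ∈ st.v
    · have hL : loopS tree (fB'+1) ((node, e) :: rest) st = loopS tree fB' rest st := by
        simp [loopS, hv]
      have hR : procA tree fA ((node, e) :: rest) st = procA tree fA rest st := by
        rw [procA_cons, bodyA_of_mem tree fA st (node, e) hv]
      rw [hL, hR]
      refine IH fB' (by omega) rest st fA (fun p hp => hall p (List.mem_cons_of_mem _ hp)) ?_ hm
      unfold phi at hphi ⊢
      simp only [List.length_cons] at hphi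
      omega
    · have hvm : node ∉ st.v := hv
      have hC : node ∈ Cl tree := hall (node, e) (List.mem_cons_self)
      have hpos := mU_pos tree hC hvm
      obtain ⟨fA', rfl⟩ : ∃ fA', fA = fA' + 1 := ⟨fA - 1, by omega⟩
      rw [loopS_succ_not_mem tree fB' node e rest st hvm]
      have hall' : ∀ p ∈ (getNbrs tree node).map (fun sub => (sub, e+1)) ++ rest, p.1 ∈ Cl tree := by
        intro p hp
        rcases List.mem_append.1 hp with hp | hp
        · obtain ⟨sub, hsub, rfl⟩ := List.mem_map.1 hp
          exact nbr_mem_Cl tree node sub hsub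
        · exact hall p (List.mem_cons_of_mem _ hp)
      have hphi' : phi tree ((getNbrs tree node).map (fun sub => (sub, e+1)) ++ rest) (visit node e st) ≤ fB' := by
        have := phi_visit_le tree e rest hC hvm; omega
      have hm' : mU tree (visit node e st) ≤ fA' := by
        have := mU_visit_lt tree e hC hvm; omega
      rw [IH fB' (by omega) _ (visit node e st) fA' hall' hphi' hm']
      have hR : procA tree (fA'+1) ((node, e) :: rest) st
          = procA tree (fA'+1) rest (dfsA tree (fA'+1) node e st) := by
        rw [procA_cons, bodyA_of_not_mem tree (fA'+1) st (node, e) hvm]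
      rw [hR, dfsA_succ_eq, procA_append]
      apply procA_fuel_congr tree rest _ (fun p hp => hall p (List.mem_cons_of_mem _ hp))
      · exact le_trans (mU_procA_le tree fA' _ (visit node e st)) hm'
      · exact le_trans (le_trans (mU_procA_le tree fA' _ (visit node e st)) hm') (by omega)

theorem sum_dedup (l : List Int) (f : Int → Nat) :
    ((PySem.List.dedup l).map f).sum = ∑ x ∈ l.toFinset, f x := by
  have hfin : (PySem.List.dedup l).toFinset = l.toFinset := by
    ext x; simp [List.mem_toFinset]
  rw [← hfin, List.sum_toFinset f (PySem.List.nodup_dedup l)]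

theorem statesS_eq (tree : List (Int × List Int)) (k : Int) :
    loopS tree (fuelB tree) [(0, k)] ⟨[], [], []⟩ = dfsA tree (fuelA tree) 0 k ⟨[], [], []⟩ := by
  have h0 : (0 : Int) ∈ Cl tree := List.mem_cons_self
  have hm0 : mU tree ⟨[], [], []⟩ ≤ fuelA tree := by
    unfold mU fuelA
    have h1 : (Cl tree).toFinset \ (([] : List Int)).toFinset = (Cl tree).toFinset := by simp
    rw [show (⟨[], [], []⟩ : DfsSt).v = ([] : List Int) from rfl, h1]
    have := List.toFinset_card_le (Cl tree)
    unfold Cl at this ⊢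
    omega
  have hphi0 : phi tree [(0, k)] ⟨[], [], []⟩ ≤ fuelB tree := by
    unfold phi fuelB
    rw [show (⟨[], [], []⟩ : DfsSt).v = ([] : List Int) from rfl]
    simp only [List.toFinset_nil, Finset.sdiff_empty, List.length_cons, List.length_nil]
    rw [sum_dedup]
    have : ∀ x, degF tree x = 1 + (getNbrs tree x).length := fun _ => rfl
    simp only [this]
    unfold Cl
    omega
  rw [loopS_eq_procA tree (fuelB tree) [(0, k)] ⟨[], [], []⟩ (fuelA tree)
      (by intro p hp; simp at hp; subst hp; exact h0) hphi0 hm0]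
  rw [procA_cons, bodyA_of_not_mem tree (fuelA tree) ⟨[], [], []⟩ (0, k) (by simp)]
  rfl

-- ---- simulation: B's dict loop vs the set-state loop ----------------------

-- projection of a full-distance stack entry to B's parity entry
def pproj (q : Int × Int) : Int × Int := (q.1, q.2 % 2)

-- invariant tying B's dict to the three sets of the set-state loop
def InvBD (st : DfsSt) (par : PySem.Dict Int Int) : Prop :=
  par.items.map (fun q => q.1) = st.v ∧
  (par.items.filter (fun q => q.2 == 0)).map (fun q => q.1) = st.a ∧
  (par.items.filter (fun q => !(q.2 == 0))).map (fun q => q.1) = st.b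

theorem emod2_succ (e : Int) : (e + 1) % 2 = 1 - e % 2 := by omega

theorem loopB_sim (tree : List (Int × List Int)) :
    ∀ (f : Nat) (stack : List (Int × Int)) (st : DfsSt) (par : PySem.Dict Int Int),
      InvBD st par → InvBD (loopS tree f stack st) (loopB tree f (stack.map pproj) par) := by
  intro f
  induction f with
  | zero =>
      intro stack st par hI
      match stack with
      | [] => exact hI
      | q :: qs => exact hI
  | succ f ih =>
      intro stack st par hI
      obtain ⟨hv, ha, hb⟩ := hI
      match stack with
      | [] => exact ⟨hv, ha, hb⟩
      | (node, e) :: rest =>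
        have hkeys : par.keys = st.v := hv
        have hcond : par.contains node = PySem.Set.contains st.v node := by
          by_cases hmem : node ∈ st.v
          · rw [(PySem.Dict.contains_iff_mem_keys par node).2 (by rw [hkeys]; exact hmem)]
            simp [hmem]
          · have : ¬ par.contains node = true := fun hc =>
              hmem (hkeys ▸ (PySem.Dict.contains_iff_mem_keys par node).1 hc)
            simp only [Bool.not_eq_true] at this
            rw [this]
            have : ¬ PySem.Set.contains st.v node = true := fun hc =>
              hmem ((PySem.Set.contains_iff _ _).1 hc)
            simp only [Bool.not_eq_true] at this
            rw [this]
        show InvBD (loopS tree (f+1) ((node, e) :: rest) st)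
          (loopB tree (f+1) (pproj (node, e) :: rest.map pproj) par)
        by_cases hmem : node ∈ st.v
        · have hcT : par.contains node = true := by
            rw [hcond]; exact (PySem.Set.contains_iff _ _).2 hmem
          have hL : loopS tree (f+1) ((node, e) :: rest) st = loopS tree f rest st := by
            simp [loopS, hmem]
          have hR : loopB tree (f+1) (pproj (node, e) :: rest.map pproj) par
              = loopB tree f (rest.map pproj) par := by
            simp [pproj, loopB, hcT]
          rw [hL, hR]; exact ih rest st par ⟨hv, ha, hb⟩
        · have hcF : par.contains node = false := by
            rw [hcond]
            have : ¬ PySem.Set.contains st.v node = true := fun hc =>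
              hmem ((PySem.Set.contains_iff _ _).1 hc)
            simpa using this
          have hnotA : node ∉ st.a := by
            intro hx
            apply hmem
            rw [← ha] at hx
            obtain ⟨q, hq, rfl⟩ := List.mem_map.1 hx
            have : q ∈ par.items := List.mem_of_mem_filter hq
            rw [← hv]; exact List.mem_map.2 ⟨q, this, rfl⟩
          have hnotB : node ∉ st.b := by
            intro hx
            apply hmem
            rw [← hb] at hx
            obtain ⟨q, hq, rfl⟩ := List.mem_map.1 hx
            have : q ∈ par.items := List.mem_of_mem_filter hq
            rw [← hv]; exact List.mem_map.2 ⟨q, this, rfl⟩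
          have hL := loopS_succ_not_mem tree f node e rest st hmem
          have hR : loopB tree (f+1) (pproj (node, e) :: rest.map pproj) par
              = loopB tree f ((getNbrs tree node).map (fun sub => (sub, 1 - e % 2)) ++ rest.map pproj)
                  (par.insert node (e % 2)) := by
            simp [pproj, loopB, hcF]
          rw [hL, hR]
          have hstack : (getNbrs tree node).map (fun sub => (sub, 1 - e % 2)) ++ rest.map pproj
              = (((getNbrs tree node).map (fun sub => (sub, e+1)) ++ rest).map pproj) := by
            simp [pproj, List.map_map, Function.comp, emod2_succ]
          rw [hstack]
          apply ih
          -- re-establish the invariant after one visit step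
          have hitems : (par.insert node (e % 2)).items = par.items ++ [(node, e % 2)] :=
            PySem.Dict.items_insert_of_not_contains par (e % 2) hcF
          have hpar2 : e % 2 = 0 ∨ e % 2 = 1 := by omega
          refine ⟨?_, ?_, ?_⟩
          · rw [hitems]
            show (par.items ++ [(node, e % 2)]).map (fun q => q.1) = (visit node e st).v
            rw [List.map_append, hv]
            show st.v ++ [node] = PySem.Set.add st.v node
            rw [PySem.Set.add_eq_ite]
            simp [hmem]
          · rw [hitems]
            show ((par.items ++ [(node, e % 2)]).filter (fun q => q.2 == 0)).map (fun q => q.1)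
              = (visit node e st).a
            rw [List.filter_append, List.map_append, ha]
            rcases hpar2 with h2 | h2
            · have hne : ¬ ((e % 2 : Int) == 1) = true := by simp [h2]
              simp only [visit]
              rw [if_neg hne]
              rw [PySem.Set.add_eq_ite]
              simp [hnotA, h2]
            · have heq : ((e % 2 : Int) == 1) = true := by simp [h2]
              simp only [visit]
              rw [if_pos heq]
              simp [h2]
          · rw [hitems]
            show ((par.items ++ [(node, e % 2)]).filter (fun q => !(q.2 == 0))).map (fun q => q.1)
              = (visit node e st).b
            rw [List.filter_append, List.map_append, hb]
            rcases hpar2 with h2 | h2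
            · have hne : ¬ ((e % 2 : Int) == 1) = true := by simp [h2]
              simp only [visit]
              rw [if_neg hne]
              simp [h2]
            · have heq : ((e % 2 : Int) == 1) = true := by simp [h2]
              simp only [visit]
              rw [if_pos heq]
              rw [PySem.Set.add_eq_ite]
              simp [hnotB, h2]

-- keys of B's dict stay Nodup through the loop
theorem loopB_nodup (tree : List (Int × List Int)) :
    ∀ (f : Nat) (stack : List (Int × Int)) (par : PySem.Dict Int Int),
      par.keys.Nodup → (loopB tree f stack par).keys.Nodup := by
  intro f
  induction f with
  | zero =>
      intro stack par h
      match stack with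
      | [] => exact h
      | q :: qs => exact h
  | succ f ih =>
      intro stack par h
      match stack with
      | [] => exact h
      | (node, p) :: rest =>
        show (loopB tree (f+1) ((node, p) :: rest) par).keys.Nodup
        by_cases hc : par.contains node = true
        · simp only [loopB, hc, if_pos]
          exact ih rest par h
        · have hcF : par.contains node = false := by simpa using hc
          simp only [loopB, hcF, Bool.false_eq_true, if_neg, not_false_iff]
          exact ih _ _ (PySem.Dict.nodup_keys_insert _ _ _ h)

-- the two final states determine the same output row for every node
theorem out_row_eq (st : DfsSt) (par : PySem.Dict Int Int)
    (hI : InvBD st par) (hnd : par.keys.Nodup) (node : Int) :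
    (par.get? node == some 0) = PySem.Set.contains st.a node := by
  obtain ⟨hv, ha, _⟩ := hI
  by_cases hmem : node ∈ st.a
  · rw [← ha] at hmem
    obtain ⟨⟨x, w⟩, hq, rfl⟩ := List.mem_map.1 hmem
    have hq2 : w = 0 := by
      have := List.of_mem_filter hq
      simpa using this
    have hqi : (x, w) ∈ par.items := List.mem_of_mem_filter hq
    have hget : par.get? x = some w := PySem.Dict.get?_of_mem_items par hqi hnd
    rw [hget, hq2]
    have hca : PySem.Set.contains st.a x = true := (PySem.Set.contains_iff _ _).2 (by
      rw [← ha]; exact List.mem_map.2 ⟨(x, w), hq, rfl⟩)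
    rw [hca]
    simp
  · have hcF : PySem.Set.contains st.a node = false := by
      have : ¬ PySem.Set.contains st.a node = true := fun hc =>
        hmem ((PySem.Set.contains_iff _ _).1 hc)
      simpa using this
    rw [hcF]
    cases hg : par.get? node with
    | none => simp
    | some w =>
        have hwi : (node, w) ∈ par.items := PySem.Dict.mem_items_of_get?_eq_some par hg
        have hw0 : ¬ w = 0 := by
          intro h0
          apply hmem
          rw [← ha]
          exact List.mem_map.2 ⟨(node, w), List.mem_filter.2 ⟨hwi, by simp [h0]⟩, rfl⟩
        simp [hw0]

-- the counts agree too
theorem counts_eq (st : DfsSt) (par : PySem.Dict Int Int) (hI : InvBD st par) :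
    ((par.values.filter (fun p => p == 0)).length : Int) = (st.a.length : Int) ∧
    ((par.size : Int) - ((par.values.filter (fun p => p == 0)).length : Int)) = (st.b.length : Int) := by
  obtain ⟨hv, ha, hb⟩ := hI
  have hvals : par.values = par.items.map (fun q => q.2) := rfl
  have h1 : (par.values.filter (fun p => p == 0)).length
      = (par.items.filter (fun q => q.2 == 0)).length := by
    rw [hvals, List.filter_map, List.length_map]
    rfl
  have h2 : (par.items.filter (fun q => q.2 == 0)).length = st.a.length := by
    rw [← ha, List.length_map]
  have hsize : par.size = par.items.length := rfl
  have h3 : (par.items.filter (fun q => !(q.2 == 0))).length = st.b.length := by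
    rw [← hb, List.length_map]
  have hsplit : par.items.length = (par.items.filter (fun q => q.2 == 0)).length
      + (par.items.filter (fun q => !(q.2 == 0))).length :=
    List.length_eq_length_filter_add (l := par.items) (fun q => q.2 == 0)
  constructor
  · rw [h1, h2]
  · rw [h1, hsize]
    omega

theorem states_final (tree : List (Int × List Int)) (k : Int) :
    InvBD (dfsA tree (fuelA tree) 0 k ⟨[], [], []⟩)
      (loopB tree (fuelB tree) [(0, k % 2)] PySem.Dict.empty) := by
  have hinit : InvBD ⟨[], [], []⟩ PySem.Dict.empty := ⟨rfl, rfl, rfl⟩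
  have := loopB_sim tree (fuelB tree) [(0, k)] ⟨[], [], []⟩ PySem.Dict.empty hinit
  rw [statesS_eq tree k] at this
  simpa [pproj] using this

-- ===== VERDICT (by name: the statement is the Claim_ definition above) =====
theorem markTree_spec : Claim_equal_markTree := by
  intro tree n k _ _
  unfold Spec_markTree markTree markTree_alt
  have hI := states_final tree k
  have hnd : (loopB tree (fuelB tree) [(0, k % 2)] PySem.Dict.empty).keys.Nodup :=
    loopB_nodup tree _ _ _ (by simp)
  obtain ⟨hc1, hc2⟩ := counts_eq _ _ hI
  have hc2' : ((loopB tree (fuelB tree) [(0, k % 2)] PySem.Dict.empty).size : Int)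
      - ((dfsA tree (fuelA tree) 0 k ⟨[], [], []⟩).a.length : Int)
      = ((dfsA tree (fuelA tree) 0 k ⟨[], [], []⟩).b.length : Int) := by
    rw [← hc1]; exact hc2
  apply List.map_congr_left
  intro node _
  rw [out_row_eq _ _ hI hnd node, hc1, hc2']
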